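-- pv_equiv track=rewrite | github.com/launchableinc/cli | launchable/test_runners/cucumber.py | _create_file_candidate_list
-- ===== SOURCE A (Python) =====
-- from copy import deepcopy
-- from typing import Dict, Generator, List, Optional
--
-- def _create_file_candidate_list(file: str) -> List[str]:
--     list = [""]
--     for c in file:
--         if c == "-":
--             l = len(list)
--             list += deepcopy(list)
--             for i in range(l):
--                 list[i] += '-'
--             for i in range(l, len(list)):
--                 list[i] += '/'
--         else:
--             for i in range(len(list)):
--                 list[i] += c
--
--     return list
-- ===== SOURCE B (Python) =====
-- from typing import List
--
--
-- def _expand(parts: List[str]) -> List[str]: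
--     if len(parts) <= 1:
--         return parts[:]
--     rest = _expand(parts[1:])
--     return [parts[0] + sep + t for t in rest for sep in ("-", "/")]
--
--
-- def _create_file_candidate_list(file: str) -> List[str]:
--     return _expand(file.split("-"))
-- ===== Notes on version B (the rewrite author's own statement) =====
-- stated objective: alternative
-- what changed: Replaces the incremental list-doubling over the characters with a split at the dashes followed by a recursive reconstruction that enumerates the dash/slash choice at each separator.
import Mathlib
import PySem

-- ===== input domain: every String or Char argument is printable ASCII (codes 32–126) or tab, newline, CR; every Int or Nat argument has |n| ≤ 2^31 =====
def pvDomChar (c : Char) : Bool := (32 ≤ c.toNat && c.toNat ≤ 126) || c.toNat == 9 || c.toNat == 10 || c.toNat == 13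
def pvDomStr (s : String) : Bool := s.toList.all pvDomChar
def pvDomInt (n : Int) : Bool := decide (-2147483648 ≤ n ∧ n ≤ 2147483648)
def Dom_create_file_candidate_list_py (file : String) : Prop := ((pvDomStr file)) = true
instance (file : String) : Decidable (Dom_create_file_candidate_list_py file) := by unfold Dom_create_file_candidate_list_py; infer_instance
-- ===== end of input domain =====

-- B replaces A's incremental list-doubling over the characters by a split on '-' followed by a
-- recursive reconstruction enumerating the dash/slash choice at each separator (alternative decomposition).

-- ===== PORT A =====
-- one character step of A's loop: on '-' the list is duplicated and the first half gets '-', the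
-- second '/' (the two index loops become maps over the halves); otherwise every entry gets c appended
def pvAStep (acc : List (List Char)) (c : Char) : List (List Char) :=
  if c = '-' then (acc.map (· ++ ['-'])) ++ (acc.map (· ++ ['/']))
  else acc.map (· ++ [c])

def create_file_candidate_list_py (file : String) : List String :=
  (file.toList.foldl pvAStep [[]]).map String.ofList

-- ===== PORT B =====
-- recursion of Source B's _expand over the split parts (comprehension order: outer t, inner sep)
def pvExpand : List (List Char) → List (List Char)
  | [] => []
  | [p] => [p]
  | p :: ps => (pvExpand ps).flatMap (fun t => [p ++ ['-'] ++ t, p ++ ['/'] ++ t])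

def create_file_candidate_list_py_alt (file : String) : List String :=
  (pvExpand (PySem.Chars.splitOn file.toList ['-'])).map String.ofList

-- ===== PRECONDITION & SPEC =====
def Spec_create_file_candidate_list_py (file : String) (out : List String) : Prop := out = create_file_candidate_list_py_alt file
instance (file : String) (out : List String) : Decidable (Spec_create_file_candidate_list_py file out) := by unfold Spec_create_file_candidate_list_py; infer_instance

-- ===== CLAIM (what is proved, stated in full; the proofs are below) =====
def Claim_equal_create_file_candidate_list_py : Prop := ∀ (file : String), Dom_create_file_candidate_list_py file → Spec_create_file_candidate_list_py file (create_file_candidate_list_py file)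

-- ===== LEMMAS AND PROOFS =====

-- the split of a char list on '-', in head-recursive form (proof-only specification)
def pvSplitChars : List Char → List (List Char)
  | [] => [[]]
  | c :: cs =>
    if c = '-' then [] :: pvSplitChars cs
    else match pvSplitChars cs with
      | [] => [[c]]      -- unreachable: pvSplitChars is never []
      | p :: ps => (c :: p) :: ps

theorem pvSplitChars_ne_nil (cs : List Char) : pvSplitChars cs ≠ [] := by
  induction cs with
  | nil => simp [pvSplitChars]
  | cons c cs ih =>
    simp only [pvSplitChars]
    split
    · simp
    · cases h : pvSplitChars cs <;> simp

theorem pvGo_spec (fuel : Nat) : ∀ (l cur : List Char) (accs : List (List Char)),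
    l.length ≤ fuel →
    PySem.Chars.splitOn.go ['-'] fuel l cur accs =
      accs.reverse ++ (match pvSplitChars l with
        | [] => [cur.reverse]
        | p :: ps => (cur.reverse ++ p) :: ps) := by
  induction fuel with
  | zero =>
    intro l cur accs h
    have : l = [] := List.eq_nil_of_length_eq_zero (Nat.le_zero.mp h)
    subst this
    simp [PySem.Chars.splitOn.go, pvSplitChars]
  | succ fuel ih =>
    intro l cur accs h
    cases l with
    | nil => simp [PySem.Chars.splitOn.go, pvSplitChars]
    | cons c rest =>
      rw [PySem.Chars.splitOn.go]
      by_cases hc : c = '-'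
      · subst hc
        have hpre : List.isPrefixOf ['-'] ('-' :: rest) = true := by simp [List.isPrefixOf]
        rw [if_pos hpre]
        simp only [List.length_singleton, List.drop_succ_cons, List.drop_zero]
        simp only [List.length_cons] at h
        rw [ih rest [] _ (by omega)]
        cases hs : pvSplitChars rest with
        | nil => exact absurd hs (pvSplitChars_ne_nil rest)
        | cons p ps => simp [pvSplitChars, hs]
      · have hpre : List.isPrefixOf ['-'] (c :: rest) = false := by
          simp [List.isPrefixOf]; exact fun h' => absurd h'.symm hc
        rw [if_neg (by simp [hpre])]
        simp only [List.length_cons] at h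
        rw [ih rest (c :: cur) _ (by omega)]
        cases hs : pvSplitChars rest with
        | nil => exact absurd hs (pvSplitChars_ne_nil rest)
        | cons p ps => simp [pvSplitChars, hs, hc]

theorem pvSplitOn_eq (cs : List Char) : PySem.Chars.splitOn cs ['-'] = pvSplitChars cs := by
  have := pvGo_spec (cs.length + 1) cs [] [] (by omega)
  rw [PySem.Chars.splitOn] at *
  rw [this]
  cases hs : pvSplitChars cs with
  | nil => exact absurd hs (pvSplitChars_ne_nil cs)
  | cons p ps => simp

-- A's loop from any start list L, in flatMap form
theorem pvFold_flatMap (cs : List Char) : ∀ (L : List (List Char)),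
    List.foldl pvAStep L cs =
      (List.foldl pvAStep [[]] cs).flatMap (fun s => L.map (· ++ s)) := by
  induction cs with
  | nil => intro L; simp
  | cons c cs ih =>
    intro L
    simp only [List.foldl_cons]
    rw [ih (pvAStep L c), ih (pvAStep [[]] c), List.flatMap_assoc]
    by_cases hc : c = '-'
    · subst hc
      simp [pvAStep, List.flatMap_def, List.map_append, List.map_map, Function.comp_def,
        List.append_assoc]
    · simp [pvAStep, hc, List.flatMap_def, List.map_map, Function.comp_def, List.append_assoc]

theorem pvExpand_cons_head (c : Char) (p : List Char) (ps : List (List Char)) :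
    pvExpand ((c :: p) :: ps) = (pvExpand (p :: ps)).map (fun t => c :: t) := by
  cases ps with
  | nil => simp [pvExpand]
  | cons q qs => simp [pvExpand, List.map_flatMap]

theorem pvMain (cs : List Char) :
    List.foldl pvAStep [[]] cs = pvExpand (pvSplitChars cs) := by
  induction cs with
  | nil => simp [pvExpand, pvSplitChars]
  | cons c cs ih =>
    simp only [List.foldl_cons]
    rw [pvFold_flatMap, ih]
    by_cases hc : c = '-'
    · subst hc
      cases hs : pvSplitChars cs with
      | nil => exact absurd hs (pvSplitChars_ne_nil cs)
      | cons p ps =>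
        simp [pvSplitChars, hs, pvAStep, pvExpand, List.flatMap_def]
    · cases hs : pvSplitChars cs with
      | nil => exact absurd hs (pvSplitChars_ne_nil cs)
      | cons p ps =>
        simp only [pvSplitChars, if_neg hc, hs]
        rw [pvExpand_cons_head, ← hs]
        have he : (fun s => List.map (fun x => x ++ s) (pvAStep [[]] c)) = fun s => [c :: s] := by
          funext s; simp [pvAStep, hc]
        rw [he, ← List.map_eq_flatMap]

-- ===== VERDICT (by name: the statement is the Claim_ definition above) =====
theorem create_file_candidate_list_py_spec : Claim_equal_create_file_candidate_list_py := by
  intro file _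
  unfold Spec_create_file_candidate_list_py create_file_candidate_list_py create_file_candidate_list_py_alt
  rw [pvMain, pvSplitOn_eq]
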